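-- pv_equiv track=rewrite | github.com/santiagoa150/EDD_Modules | modulo 11/ejercicio6.py | min_movimientos_caballo
-- ===== SOURCE A (Python) =====
-- movimientos_caballo = [(2, 1), (2, -1), (-2, 1), (-2, -1), (1, 2), (1, -2), (-1, 2), (-1, -2)]
--
-- def es_valida(x, y):
--     return 1 <= x <= 8 and 1 <= y <= 8
--
-- def min_movimientos_caballo(origen, destino):
--     x_origen, y_origen = origen
--     x_destino, y_destino = destino
--
--     visitado = [[False] * 9 for _ in range(9)]
--     cola = [(x_origen, y_origen, 0)]
--
--     while cola:
--         x, y, movimientos = cola.pop(0)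
--         if x == x_destino and y == y_destino:
--             return movimientos
--
--         for dx, dy in movimientos_caballo:
--             nuevo_x, nuevo_y = x + dx, y + dy
--             if es_valida(nuevo_x, nuevo_y) and not visitado[nuevo_x][nuevo_y]:
--                 visitado[nuevo_x][nuevo_y] = True
--                 cola.append((nuevo_x, nuevo_y, movimientos + 1))
--
--     return -1
-- ===== SOURCE B (Python) =====
-- movimientos_caballo = [(2, 1), (2, -1), (-2, 1), (-2, -1), (1, 2), (1, -2), (-1, 2), (-1, -2)]
--
-- def es_valida(x, y):
--     return 1 <= x <= 8 and 1 <= y <= 8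
--
-- def min_movimientos_caballo(origen, destino):
--     # Recursive level-synchronous BFS over a visited SET of squares instead of
--     # a FIFO queue of (x, y, moves) triples and a 9x9 boolean board.
--     objetivo = (destino[0], destino[1])
--
--     def nivel(frontera, visitados, dist):
--         if not frontera:
--             return -1
--         if objetivo in frontera:
--             return dist
--         siguiente = []
--         for x, y in frontera:
--             for dx, dy in movimientos_caballo:
--                 casilla = (x + dx, y + dy)
--                 if es_valida(casilla[0], casilla[1]) and casilla not in visitados:
--                     visitados.add(casilla)
--                     siguiente.append(casilla)
--         return nivel(siguiente, visitados, dist + 1)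
--
--     return nivel([(origen[0], origen[1])], set(), dist=0)
-- ===== Notes on version B (the rewrite author's own statement) =====
-- stated objective: alternative
-- what changed: A's FIFO queue of (x, y, moves) triples with a 9x9 mutable boolean board is replaced by a recursive level-synchronous BFS: a frontier list of squares per distance, a visited SET of squares, and a shared distance counter per level.
import Mathlib
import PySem

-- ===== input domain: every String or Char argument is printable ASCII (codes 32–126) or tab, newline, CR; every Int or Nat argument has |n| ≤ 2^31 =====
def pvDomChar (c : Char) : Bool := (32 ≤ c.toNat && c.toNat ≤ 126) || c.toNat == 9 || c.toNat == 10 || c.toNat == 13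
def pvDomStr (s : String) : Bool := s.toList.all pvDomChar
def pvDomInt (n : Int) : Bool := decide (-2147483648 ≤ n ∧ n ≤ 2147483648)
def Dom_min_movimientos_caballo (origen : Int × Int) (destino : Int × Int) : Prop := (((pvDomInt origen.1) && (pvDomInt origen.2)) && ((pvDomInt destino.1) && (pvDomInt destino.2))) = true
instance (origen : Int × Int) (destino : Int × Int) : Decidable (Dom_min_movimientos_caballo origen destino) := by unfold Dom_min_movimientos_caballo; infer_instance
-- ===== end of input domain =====

-- B replaces A's FIFO queue of (x, y, moves) triples and 9x9 mutable boolean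
-- board by a recursive level-synchronous BFS over a visited SET of squares
-- (objective: alternative decomposition and data structures, same results).

-- ===== PORT A =====
-- shared module-level context of A and B: movimientos_caballo, es_valida
def movs : List (Int × Int) := [(2, 1), (2, -1), (-2, 1), (-2, -1), (1, 2), (1, -2), (-1, 2), (-1, -2)]

def esValida (x y : Int) : Bool := decide (1 ≤ x ∧ x ≤ 8 ∧ 1 ≤ y ∧ y ≤ 8)

-- visitado[x][y] read/write; exact for the accesses port A performs, which are
-- all guarded by es_valida (so 1 ≤ x,y ≤ 8, inside the 9×9 board, no negative index)
def vget (v : List (List Bool)) (x y : Int) : Bool := (v.getD x.toNat []).getD y.toNat false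

def vset (v : List (List Bool)) (x y : Int) : List (List Bool) :=
  v.set x.toNat ((v.getD x.toNat []).set y.toNat true)

-- body of A's inner `for dx, dy in movimientos_caballo` loop; state = (visitado, cola)
def astep (x y m : Int) (st : List (List Bool) × List (Int × Int × Int)) (mv : Int × Int) :
    List (List Bool) × List (Int × Int × Int) :=
  let nx := x + mv.1
  let ny := y + mv.2
  if esValida nx ny && !(vget st.1 nx ny) then (vset st.1 nx ny, st.2 ++ [(nx, ny, m + 1)]) else st

-- A's `while cola` loop; fuel only makes it total (800 is never exhausted: the
-- spec proof shows the loop pops at most 82 entries before the queue empties)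
def aloop (xd yd : Int) : Nat → List (List Bool) → List (Int × Int × Int) → Int
  | 0, _, _ => -1
  | _ + 1, _, [] => -1
  | fuel + 1, v, (x, y, m) :: rest =>
      if x = xd ∧ y = yd then m
      else
        let st := movs.foldl (astep x y m) (v, rest)
        aloop xd yd fuel st.1 st.2

def min_movimientos_caballo (origen : Int × Int) (destino : Int × Int) : Int :=
  aloop destino.1 destino.2 800 (List.replicate 9 (List.replicate 9 false))
    [(origen.1, origen.2, 0)]

-- ===== PORT B =====
-- body of B's inner move loop; state = (visitados : set of squares, siguiente)
def bstep (x y : Int) (st : PySem.Set (Int × Int) × List (Int × Int)) (mv : Int × Int) :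
    PySem.Set (Int × Int) × List (Int × Int) :=
  let c := (x + mv.1, y + mv.2)
  if esValida c.1 c.2 && !(PySem.Set.contains st.1 c) then (PySem.Set.add st.1 c, st.2 ++ [c]) else st

-- B's `for x, y in frontera` loop body
def expB (st : PySem.Set (Int × Int) × List (Int × Int)) (p : Int × Int) :
    PySem.Set (Int × Int) × List (Int × Int) :=
  movs.foldl (bstep p.1 p.2) st

-- B's recursive helper `nivel(frontera, visitados, dist)`; fuel only makes it
-- total (at most 83 levels are possible before the frontier empties)
def nivelB (xd yd : Int) : Nat → List (Int × Int) → PySem.Set (Int × Int) → Int → Int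
  | 0, _, _, _ => -1
  | _ + 1, [], _, _ => -1
  | fuel + 1, q :: fs, s, dist =>
      if (xd, yd) ∈ q :: fs then dist
      else
        let st := (q :: fs).foldl expB (s, [])
        nivelB xd yd fuel st.2 st.1 (dist + 1)

def min_movimientos_caballo_alt (origen : Int × Int) (destino : Int × Int) : Int :=
  nivelB destino.1 destino.2 800 [(origen.1, origen.2)] PySem.Set.empty 0

-- ===== PRECONDITION & SPEC =====
def Spec_min_movimientos_caballo (origen : Int × Int) (destino : Int × Int) (out : Int) : Prop := out = min_movimientos_caballo_alt origen destino
instance (origen : Int × Int) (destino : Int × Int) (out : Int) : Decidable (Spec_min_movimientos_caballo origen destino out) := by unfold Spec_min_movimientos_caballo; infer_instance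

-- ===== CLAIM (what is proved, stated in full; the proofs are below) =====
def Claim_equal_min_movimientos_caballo : Prop := ∀ (origen : Int × Int) (destino : Int × Int), Dom_min_movimientos_caballo origen destino → Spec_min_movimientos_caballo origen destino (min_movimientos_caballo origen destino)

-- ===== LEMMAS AND PROOFS =====

-- tagging a frontier square with its distance gives A's queue entry
def tag (d : Int) (p : Int × Int) : Int × Int × Int := (p.1, p.2, d)

-- number of unvisited cells, the termination/fuel measure
def fc (v : List (List Bool)) : Nat := (v.map (List.count false)).sum

def vshape (v : List (List Bool)) : Prop := v.length = 9 ∧ ∀ r ∈ v, r.length = 9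

def binit : List (List Bool) := List.replicate 9 (List.replicate 9 false)

-- the 9×9 board determined by a set of visited squares: exactly those marked
def boardOf (s : List (Int × Int)) : List (List Bool) :=
  s.foldl (fun v p => vset v p.1 p.2) binit

-- every square ever placed in B's visited set is a valid board square
def SInv (s : List (Int × Int)) : Prop := ∀ p ∈ s, esValida p.1 p.2 = true

-- generic accumulator-irrelevance for folds whose step only appends to the 2nd component
theorem foldl_acc {σ α β : Type} (f : σ × List β → α → σ × List β)
    (hf : ∀ v acc a, f (v, acc) a = ((f (v, []) a).1, acc ++ (f (v, []) a).2)) :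
    ∀ (L : List α) (v : σ) (acc : List β),
      L.foldl f (v, acc) = ((L.foldl f (v, [])).1, acc ++ (L.foldl f (v, [])).2) := by
  intro L
  induction L with
  | nil => intro v acc; simp
  | cons a L ih =>
      intro v acc
      simp only [List.foldl_cons]
      rw [hf v acc a, hf v [] a]
      simp only [List.nil_append]
      rw [ih ((f (v, []) a).1) (acc ++ (f (v, []) a).2), ih ((f (v, []) a).1) ((f (v, []) a).2)]
      simp

theorem astep_acc (x y m : Int) (v : List (List Bool)) (acc : List (Int × Int × Int))
    (a : Int × Int) :
    astep x y m (v, acc) a = ((astep x y m (v, []) a).1, acc ++ (astep x y m (v, []) a).2) := by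
  simp only [astep]
  split <;> simp

theorem bstep_acc (x y : Int) (s : PySem.Set (Int × Int)) (acc : List (Int × Int)) (a : Int × Int) :
    bstep x y (s, acc) a = ((bstep x y (s, []) a).1, acc ++ (bstep x y (s, []) a).2) := by
  simp only [bstep]
  split <;> simp

theorem expB_acc (s : PySem.Set (Int × Int)) (acc : List (Int × Int)) (p : Int × Int) :
    expB (s, acc) p = ((expB (s, []) p).1, acc ++ (expB (s, []) p).2) := by
  simp only [expB]
  exact foldl_acc _ (bstep_acc p.1 p.2) movs s acc

-- getD/set interaction on a list, under an in-range set index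
theorem getD_set_idx {α : Type} (l : List α) (i j : Nat) (x : α) (d : α) (hi : i < l.length) :
    (l.set i x).getD j d = if j = i then x else l.getD j d := by
  by_cases hj : j < l.length
  · rw [List.getD_eq_getElem _ _ (by simpa using hj), List.getElem_set]
    by_cases h : i = j
    · simp [h]
    · rw [if_neg h, if_neg (by omega), List.getD_eq_getElem _ _ hj]
  · rw [List.getD_eq_default _ _ (by simpa using hj), List.getD_eq_default _ _ (by omega),
      if_neg (by omega)]

theorem vget_vset (v : List (List Bool)) (a b x y : Int) (hs : vshape v)
    (ha : 1 ≤ a ∧ a ≤ 8 ∧ 1 ≤ b ∧ b ≤ 8) (hx : 1 ≤ x ∧ x ≤ 8 ∧ 1 ≤ y ∧ y ≤ 8) :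
    vget (vset v a b) x y = if x = a ∧ y = b then true else vget v x y := by
  obtain ⟨h9, hrow⟩ := hs
  have hal : a.toNat < v.length := by omega
  unfold vget vset
  rw [getD_set_idx _ _ _ _ _ hal]
  by_cases hxa : x.toNat = a.toNat
  · have hxa' : x = a := by omega
    rw [if_pos hxa]
    have hrl : (v.getD a.toNat []).length = 9 := by
      rw [List.getD_eq_getElem _ _ hal]
      exact hrow _ (List.getElem_mem _)
    rw [getD_set_idx _ _ _ _ _ (by omega)]
    by_cases hyb : y.toNat = b.toNat
    · have hyb' : y = b := by omega
      simp [hxa', hyb']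
    · have hyb' : ¬ y = b := by omega
      simp [hxa', hyb', hyb]
  · have hxa' : ¬ x = a := by omega
    simp [hxa, hxa']

theorem vshape_set (v : List (List Bool)) (x y : Int) (hs : vshape v)
    (hx : 1 ≤ x ∧ x ≤ 8) (_hy : 1 ≤ y ∧ y ≤ 8) : vshape (vset v x y) := by
  obtain ⟨hlen, hrow⟩ := hs
  constructor
  · simp [vset, hlen]
  · intro r hr
    simp only [vset] at hr
    rcases List.mem_or_eq_of_mem_set hr with h | h
    · exact hrow r h
    · subst h
      rw [List.length_set, List.getD_eq_getElem _ _ (by omega : x.toNat < v.length)]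
      exact hrow _ (List.getElem_mem _)

theorem esValida_bounds {x y : Int} (h : esValida x y = true) :
    1 ≤ x ∧ x ≤ 8 ∧ 1 ≤ y ∧ y ≤ 8 := by
  simpa [esValida] using h

theorem vshape_foldl (s : List (Int × Int)) :
    ∀ v, vshape v → SInv s → vshape (s.foldl (fun v p => vset v p.1 p.2) v) := by
  induction s with
  | nil => intro v hv _; simpa using hv
  | cons p s ih =>
      intro v hv hinv
      have hp := esValida_bounds (hinv p (List.mem_cons_self ..))
      exact ih _ (vshape_set v p.1 p.2 hv ⟨hp.1, hp.2.1⟩ ⟨hp.2.2.1, hp.2.2.2⟩)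
        (fun q hq => hinv q (List.mem_cons_of_mem p hq))

theorem vshape_binit : vshape binit := by
  constructor
  · rfl
  · intro r hr
    rw [List.eq_of_mem_replicate hr]
    rfl

theorem vshape_boardOf (s : List (Int × Int)) (hinv : SInv s) : vshape (boardOf s) :=
  vshape_foldl s binit vshape_binit hinv

theorem vget_foldl (s : List (Int × Int)) :
    ∀ v x y, vshape v → SInv s → (1 ≤ x ∧ x ≤ 8 ∧ 1 ≤ y ∧ y ≤ 8) →
      vget (s.foldl (fun v p => vset v p.1 p.2) v) x y
        = (vget v x y || decide ((x, y) ∈ s)) := by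
  induction s with
  | nil => intro v x y _ _ _; simp
  | cons p s ih =>
      intro v x y hv hinv hxy
      have hp := esValida_bounds (hinv p (List.mem_cons_self ..))
      have hv' : vshape (vset v p.1 p.2) :=
        vshape_set v p.1 p.2 hv ⟨hp.1, hp.2.1⟩ ⟨hp.2.2.1, hp.2.2.2⟩
      simp only [List.foldl_cons]
      rw [ih _ x y hv' (fun q hq => hinv q (List.mem_cons_of_mem p hq)) hxy]
      rw [vget_vset v p.1 p.2 x y hv ⟨hp.1, hp.2.1, hp.2.2.1, hp.2.2.2⟩ hxy]
      by_cases hpe : x = p.1 ∧ y = p.2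
      · have : (x, y) ∈ p :: s := by
          obtain ⟨h1, h2⟩ := hpe
          exact List.mem_cons.mpr (Or.inl (by cases p; simp_all))
        simp [hpe]
      · have hne : ¬ ((x, y) = p) := by
          cases p
          simpa [Prod.ext_iff] using hpe
        simp [hpe, List.mem_cons, hne]

theorem vget_binit (x y : Int) : vget binit x y = false := by
  unfold vget binit
  have hrow : ∀ (i : Nat), (List.replicate 9 (List.replicate 9 false)).getD i []
      = List.replicate 9 false ∨ (List.replicate 9 (List.replicate 9 false)).getD i [] = [] := by
    intro i
    by_cases h : i < 9
    · left
      rw [List.getD_eq_getElem _ _ (by simpa using h)]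
      exact List.getElem_replicate ..
    · right
      exact List.getD_eq_default _ _ (by simpa using h)
  rcases hrow x.toNat with h | h <;> rw [h]
  · by_cases h2 : y.toNat < 9
    · rw [List.getD_eq_getElem _ _ (by simpa using h2)]
      exact List.getElem_replicate ..
    · exact List.getD_eq_default _ _ (by simp only [List.length_replicate]; omega)
  · rfl

theorem vget_boardOf (s : List (Int × Int)) (x y : Int) (hinv : SInv s)
    (hxy : 1 ≤ x ∧ x ≤ 8 ∧ 1 ≤ y ∧ y ≤ 8) :
    vget (boardOf s) x y = decide ((x, y) ∈ s) := by
  unfold boardOf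
  rw [vget_foldl s binit x y vshape_binit hinv hxy, vget_binit x y]
  simp

theorem boardOf_append (s : List (Int × Int)) (c : Int × Int) :
    boardOf (s ++ [c]) = vset (boardOf s) c.1 c.2 := by
  simp [boardOf, List.foldl_append]

-- A's inner move loop on the board determined by s equals B's inner move loop
-- on s, with new squares tagged m+1; validity of the set is preserved
theorem amoves_bmoves (L : List (Int × Int)) :
    ∀ (s : PySem.Set (Int × Int)) (x y m : Int), SInv s →
      (L.foldl (astep x y m) (boardOf s, [])
          = (boardOf (L.foldl (bstep x y) (s, [])).1,
             ((L.foldl (bstep x y) (s, [])).2).map (tag (m + 1))))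
        ∧ SInv (L.foldl (bstep x y) (s, [])).1 := by
  induction L with
  | nil => intro s x y m hinv; exact ⟨by simp, hinv⟩
  | cons a L ih =>
      intro s x y m hinv
      have hmem : PySem.Set.contains s (x + a.1, y + a.2) = decide ((x + a.1, y + a.2) ∈ s) :=
        PySem.Set.contains_eq_decide ..
      simp only [List.foldl_cons]
      by_cases hval : esValida (x + a.1) (y + a.2) = true
      · have hb := esValida_bounds hval
        have hvg : vget (boardOf s) (x + a.1) (y + a.2) = decide ((x + a.1, y + a.2) ∈ s) :=
          vget_boardOf s _ _ hinv ⟨hb.1, hb.2.1, hb.2.2.1, hb.2.2.2⟩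
        by_cases hin : (x + a.1, y + a.2) ∈ s
        · -- already visited: both guards false
          have hga : astep x y m (boardOf s, []) a = (boardOf s, []) := by
            simp [astep, hvg, hin]
          have hgb : bstep x y (s, []) a = (s, []) := by
            simp [bstep, hin]
          rw [hga, hgb]
          exact ih s x y m hinv
        · -- new square: A marks the board, B adds to the set
          have hadd : PySem.Set.add s (x + a.1, y + a.2) = s ++ [(x + a.1, y + a.2)] :=
            PySem.Set.add_of_not_mem hin
          have hga : astep x y m (boardOf s, []) a
              = (vset (boardOf s) (x + a.1) (y + a.2), [(x + a.1, y + a.2, m + 1)]) := by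
            simp [astep, hvg, hin, hval]
          have hgb : bstep x y (s, []) a
              = (s ++ [(x + a.1, y + a.2)], [(x + a.1, y + a.2)]) := by
            simp [bstep, hin, hval]
          rw [hga, hgb]
          have hinv' : SInv (s ++ [(x + a.1, y + a.2)]) := by
            intro q hq
            rcases List.mem_append.mp hq with h | h
            · exact hinv q h
            · rw [List.mem_singleton.mp h]; exact hval
          obtain ⟨ihe, ihi⟩ := ih (s ++ [(x + a.1, y + a.2)]) x y m hinv'
          constructor
          · rw [← boardOf_append s (x + a.1, y + a.2),
              foldl_acc _ (astep_acc x y m) L _ [(x + a.1, y + a.2, m + 1)],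
              foldl_acc _ (bstep_acc x y) L _ [(x + a.1, y + a.2)], ihe]
            simp [tag]
          · rw [foldl_acc _ (bstep_acc x y) L _ [(x + a.1, y + a.2)]]
            exact ihi
      · have hga : astep x y m (boardOf s, []) a = (boardOf s, []) := by
          simp [astep, hval]
        have hgb : bstep x y (s, []) a = (s, []) := by
          simp [bstep, hval]
        rw [hga, hgb]
        exact ih s x y m hinv

-- counting: a guarded set flips exactly one unvisited cell
theorem count_set_true (l : List Bool) : ∀ (i : Nat), i < l.length → l.getD i false = false →
    (l.set i true).count false + 1 = l.count false := by
  induction l with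
  | nil => intro i h; simp at h
  | cons b l ih =>
      intro i hlen hget
      cases i with
      | zero =>
          simp only [List.getD_cons_zero] at hget
          subst hget
          simp
      | succ i =>
          simp only [List.getD_cons_succ] at hget
          simp only [List.length_cons, Nat.succ_lt_succ_iff] at hlen
          simp only [List.set_cons_succ, List.count_cons]
          rw [← ih i hlen hget]
          omega

theorem fc_set (v : List (List Bool)) : ∀ (i : Nat) (r : List Bool), i < v.length →
    fc (v.set i r) + (v.getD i []).count false = fc v + r.count false := by
  induction v with
  | nil => intro i r h; simp at h
  | cons a v ih =>
      intro i r hlen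
      cases i with
      | zero => simp [fc]; omega
      | succ i =>
          simp only [List.length_cons, Nat.succ_lt_succ_iff] at hlen
          simp only [List.set_cons_succ, List.getD_cons_succ]
          have := ih i r hlen
          simp only [fc, List.map_cons, List.sum_cons] at *
          omega

theorem fc_vset (v : List (List Bool)) (x y : Int) (hs : vshape v)
    (hx : 1 ≤ x ∧ x ≤ 8) (hy : 1 ≤ y ∧ y ≤ 8) (hg : vget v x y = false) :
    fc (vset v x y) + 1 = fc v := by
  obtain ⟨hlen, hrow⟩ := hs
  have hxl : x.toNat < v.length := by omega
  have hrl : (v.getD x.toNat []).length = 9 := by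
    rw [List.getD_eq_getElem _ _ hxl]
    exact hrow _ (List.getElem_mem _)
  have hyl : y.toNat < (v.getD x.toNat []).length := by omega
  have hcnt := count_set_true (v.getD x.toNat []) y.toNat hyl hg
  have hfc := fc_set v x.toNat ((v.getD x.toNat []).set y.toNat true) hxl
  simp only [vset]
  omega

-- invariant transported by B's expansion folds: validity preserved, each
-- appended square flips one unvisited cell of the determined board
def Good (st st' : PySem.Set (Int × Int) × List (Int × Int)) : Prop :=
  SInv st.1 → (SInv st'.1 ∧ fc (boardOf st'.1) + st'.2.length = fc (boardOf st.1) + st.2.length)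

theorem Good_refl (st : PySem.Set (Int × Int) × List (Int × Int)) : Good st st := by
  intro h; exact ⟨h, rfl⟩

theorem Good_trans {a b c : PySem.Set (Int × Int) × List (Int × Int)}
    (h1 : Good a b) (h2 : Good b c) : Good a c := by
  intro ha
  obtain ⟨hb, e1⟩ := h1 ha
  obtain ⟨hc, e2⟩ := h2 hb
  exact ⟨hc, by omega⟩

theorem Good_bstep (x y : Int) (st : PySem.Set (Int × Int) × List (Int × Int)) (a : Int × Int) :
    Good st (bstep x y st a) := by
  intro hs
  simp only [bstep]
  split
  · rename_i h
    simp only [Bool.and_eq_true, Bool.not_eq_true'] at h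
    obtain ⟨hv, hg⟩ := h
    have hb := esValida_bounds hv
    have hnm : (x + a.1, y + a.2) ∉ st.1 := by
      rw [PySem.Set.contains_eq_decide] at hg
      simpa using hg
    have hadd : PySem.Set.add st.1 (x + a.1, y + a.2) = st.1 ++ [(x + a.1, y + a.2)] :=
      PySem.Set.add_of_not_mem hnm
    have hinv' : SInv (st.1 ++ [(x + a.1, y + a.2)]) := by
      intro q hq
      rcases List.mem_append.mp hq with h | h
      · exact hs q h
      · rw [List.mem_singleton.mp h]; exact hv
    refine ⟨by rw [hadd]; exact hinv', ?_⟩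
    have hvg : vget (boardOf st.1) (x + a.1) (y + a.2) = false := by
      rw [vget_boardOf st.1 _ _ hs ⟨hb.1, hb.2.1, hb.2.2.1, hb.2.2.2⟩]
      simp [hnm]
    have := fc_vset (boardOf st.1) (x + a.1) (y + a.2) (vshape_boardOf st.1 hs)
      ⟨hb.1, hb.2.1⟩ ⟨hb.2.2.1, hb.2.2.2⟩ hvg
    rw [hadd, boardOf_append st.1 (x + a.1, y + a.2)]
    simp only [List.length_append, List.length_cons, List.length_nil]
    omega
  · exact ⟨hs, rfl⟩

theorem Good_foldl {α : Type}
    (f : PySem.Set (Int × Int) × List (Int × Int) → α → PySem.Set (Int × Int) × List (Int × Int))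
    (hf : ∀ st a, Good st (f st a)) (L : List α) :
    ∀ st, Good st (L.foldl f st) := by
  induction L with
  | nil => intro st; exact Good_refl st
  | cons a L ih => intro st; exact Good_trans (hf st a) (ih (f st a))

theorem Good_expB (st : PySem.Set (Int × Int) × List (Int × Int)) (p : Int × Int) :
    Good st (expB st p) :=
  Good_foldl _ (Good_bstep p.1 p.2) movs st

theorem Good_level (F : List (Int × Int)) (st : PySem.Set (Int × Int) × List (Int × Int)) :
    Good st (F.foldl expB st) :=
  Good_foldl _ Good_expB F st

-- level simulation: A's queue, holding the rest of level d followed by the partial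
-- level d+1, behaves like "check level d for the target, then expand it all at once"
-- on B's set-based state
theorem levelSim (xd yd : Int) (P : List (Int × Int)) :
    ∀ (s : PySem.Set (Int × Int)) (Q : List (Int × Int)) (d : Int) (fuel : Nat),
      SInv s → P.length ≤ fuel →
      aloop xd yd fuel (boardOf s) (P.map (tag d) ++ Q.map (tag (d + 1))) =
        if (xd, yd) ∈ P then d
        else aloop xd yd (fuel - P.length) (boardOf (P.foldl expB (s, [])).1)
          ((Q ++ (P.foldl expB (s, [])).2).map (tag (d + 1))) := by
  induction P with
  | nil => intro s Q d fuel _ _; simp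
  | cons p P ih =>
      intro s Q d fuel hinv hfuel
      obtain ⟨f, rfl⟩ : ∃ f, fuel = f + 1 := ⟨fuel - 1, by simp at hfuel; omega⟩
      simp only [List.map_cons, List.cons_append, tag]
      rw [show aloop xd yd (f + 1) (boardOf s)
            ((p.1, p.2, d) :: (P.map (tag d) ++ Q.map (tag (d + 1)))) =
          if p.1 = xd ∧ p.2 = yd then d
          else aloop xd yd f
            (movs.foldl (astep p.1 p.2 d) (boardOf s, P.map (tag d) ++ Q.map (tag (d + 1)))).1
            (movs.foldl (astep p.1 p.2 d) (boardOf s, P.map (tag d) ++ Q.map (tag (d + 1)))).2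
        from rfl]
      by_cases hp : p.1 = xd ∧ p.2 = yd
      · have hmem : (xd, yd) ∈ p :: P := by
          cases p
          simp_all
        rw [if_pos hp, if_pos hmem]
      · rw [if_neg hp]
        obtain ⟨habe, habi⟩ := amoves_bmoves movs s p.1 p.2 d hinv
        rw [foldl_acc _ (astep_acc p.1 p.2 d) movs (boardOf s)
            (P.map (tag d) ++ Q.map (tag (d + 1))), habe]
        have hcola :
            (P.map (tag d) ++ Q.map (tag (d + 1)))
              ++ (movs.foldl (bstep p.1 p.2) (s, [])).2.map (tag (d + 1))
            = P.map (tag d) ++ (Q ++ (movs.foldl (bstep p.1 p.2) (s, [])).2).map (tag (d + 1)) := by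
          simp
        rw [hcola, ih _ _ d f habi (by simp at hfuel; omega)]
        have hexp : (p :: P).foldl expB (s, []) =
            ((P.foldl expB ((expB (s, []) p).1, [])).1,
              (expB (s, []) p).2 ++ (P.foldl expB ((expB (s, []) p).1, [])).2) := by
          simp only [List.foldl_cons]
          rw [show expB (s, []) p = ((expB (s, []) p).1, (expB (s, []) p).2) from rfl]
          exact foldl_acc _ expB_acc P (expB (s, []) p).1 (expB (s, []) p).2
        by_cases hm : (xd, yd) ∈ P
        · rw [if_pos hm, if_pos (List.mem_cons_of_mem p hm)]
        · have hm2 : ¬ ((xd, yd) ∈ p :: P) := by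
            intro h
            rcases List.mem_cons.mp h with h | h
            · cases p
              simp only [Prod.mk.injEq] at h
              exact hp ⟨h.1.symm, h.2.symm⟩
            · exact hm h
          rw [if_neg hm, if_neg hm2, hexp]
          simp only [expB, List.length_cons]
          have hf2 : f + 1 - (P.length + 1) = f - P.length := by omega
          rw [hf2]
          congr 2
          simp

-- top-level simulation by strong induction on the number of unvisited cells
theorem topSim (xd yd : Int) :
    ∀ (n : Nat) (s : PySem.Set (Int × Int)) (F : List (Int × Int)) (d : Int) (fuelA fuelB : Nat),
      SInv s → fc (boardOf s) = n → F.length + n + 2 ≤ fuelA → n + 2 ≤ fuelB →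
      aloop xd yd fuelA (boardOf s) (F.map (tag d)) = nivelB xd yd fuelB F s d := by
  intro n
  induction n using Nat.strong_induction_on with
  | _ n IH =>
      intro s F d fuelA fuelB hinv hn hA hB
      obtain ⟨a, rfl⟩ : ∃ a, fuelA = a + 1 := ⟨fuelA - 1, by omega⟩
      obtain ⟨b, rfl⟩ : ∃ b, fuelB = b + 1 := ⟨fuelB - 1, by omega⟩
      cases F with
      | nil => rfl
      | cons q F' =>
          have hF : (q :: F').length ≤ a + 1 := by
            simp only [List.length_cons] at hA ⊢
            omega
          rw [show (q :: F').map (tag d) = (q :: F').map (tag d) ++ ([] : List (Int × Int)).map (tag (d + 1)) by simp]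
          rw [levelSim xd yd (q :: F') s [] d (a + 1) hinv hF]
          rw [show nivelB xd yd (b + 1) (q :: F') s d =
            if (xd, yd) ∈ q :: F' then d
            else nivelB xd yd b ((q :: F').foldl expB (s, [])).2 ((q :: F').foldl expB (s, [])).1 (d + 1)
            from rfl]
          by_cases hm : (xd, yd) ∈ q :: F'
          · simp [hm]
          · rw [if_neg hm, if_neg hm]
            obtain ⟨hinv', hcnt⟩ := Good_level (q :: F') (s, []) hinv
            simp only [List.length_nil, Nat.add_zero] at hcnt
            set st := (q :: F').foldl expB (s, []) with hst
            cases hF'' : st.2 with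
            | nil =>
                have h1 : a + 1 - (q :: F').length ≥ 1 := by
                  simp only [List.length_cons] at hA ⊢
                  omega
                obtain ⟨c, hc⟩ : ∃ c, a + 1 - (q :: F').length = c + 1 :=
                  ⟨a + 1 - (q :: F').length - 1, by omega⟩
                obtain ⟨b', hb'⟩ : ∃ b', b = b' + 1 := ⟨b - 1, by omega⟩
                rw [hc, hb']
                rfl
            | cons r R =>
                have hlt : fc (boardOf st.1) < n := by
                  rw [hF''] at hcnt
                  simp only [List.length_cons] at hcnt
                  omega
                have h2 := IH (fc (boardOf st.1)) hlt st.1 (r :: R) (d + 1)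
                  (a + 1 - (q :: F').length) b
                  hinv' rfl
                  (by rw [hF''] at hcnt
                      simp only [List.length_cons] at hA hcnt ⊢
                      omega)
                  (by rw [hF''] at hcnt
                      simp only [List.length_cons] at hcnt
                      omega)
                simpa using h2

theorem fc_binit : fc binit = 81 := by decide

-- ===== VERDICT (by name: the statement is the Claim_ definition above) =====
theorem min_movimientos_caballo_spec : Claim_equal_min_movimientos_caballo := by
  intro origen destino _
  unfold Spec_min_movimientos_caballo min_movimientos_caballo min_movimientos_caballo_alt
  have hempty : (List.replicate 9 (List.replicate 9 false)) = boardOf PySem.Set.empty := rfl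
  rw [hempty,
    show [(origen.1, origen.2, (0 : Int))] = [(origen.1, origen.2)].map (tag 0) from rfl]
  exact topSim destino.1 destino.2 81 PySem.Set.empty [(origen.1, origen.2)] 0 800 800
    (fun p hp => absurd hp (List.not_mem_nil)) (by rw [← hempty]; exact fc_binit)
    (by norm_num) (by norm_num)
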